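-- pv_equiv track=rewrite | github.com/MrPlotva/Time-Series | lorentz_research/src/motifs_comparator.py | GenerateAllMotifs
-- ===== SOURCE A (Python) =====
-- from itertools import product
--
-- def GenPatterns(L, x):
--     elements = range(1, x + 1)  # Создаем последовательность элементов от 1 до x
--     sequences = product(elements, repeat=L)  # Генерируем все возможные комбинации длиной L
--     return sequences
--
-- def GenerateMotifsByPattern(pattern, t):
--     L = len(pattern)
--     idx = []
--     idx.append(0)
--     for i in range(L):
--         idx.append(idx[len(idx) - 1] + pattern[i])
--     motifs = []
--     while idx[len(idx) - 1] != t + 1: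
--         motifs.append(idx.copy())
--         for i in range(len(idx)):
--             idx[i] += 1
--     return motifs
--
-- def GenerateAllMotifs(Kmax, L, t):
--     pattern = []
--     for i in range(L - 1):
--         pattern.append(0)
--     patterns = GenPatterns(L - 1, Kmax)
--     motifsByPatterns = []
--     for p in patterns:
--         motifs = GenerateMotifsByPattern(p, t)
--         motifsByPatterns.append([p, motifs])
--     return motifsByPatterns
-- ===== SOURCE B (Python) =====
-- def GenerateAllMotifs(Kmax, L, t):
--     result = []
--
--     def rec(p):
--         if len(p) == L - 1:
--             e = sum(p)
--             motifs = []
--             while e != t + 1: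
--                 m = [e]
--                 for d in reversed(p):
--                     m.append(m[-1] - d)
--                 m.reverse()
--                 motifs.append(m)
--                 e += 1
--             result.append([tuple(p), motifs])
--         else:
--             for v in range(1, Kmax + 1):
--                 rec(p + [v])
--
--     rec([])
--     return result
-- ===== Notes on version B (the rewrite author's own statement) =====
-- stated objective: alternative
-- what changed: B generates patterns by explicit DFS recursion (no itertools.product) and builds every motif independently back-to-front from its right endpoint e by successively subtracting the pattern gaps, looping e over endpoints, instead of A's forward prefix-sum index vector that is repeatedly copied and incremented in place.
import Mathlib
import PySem

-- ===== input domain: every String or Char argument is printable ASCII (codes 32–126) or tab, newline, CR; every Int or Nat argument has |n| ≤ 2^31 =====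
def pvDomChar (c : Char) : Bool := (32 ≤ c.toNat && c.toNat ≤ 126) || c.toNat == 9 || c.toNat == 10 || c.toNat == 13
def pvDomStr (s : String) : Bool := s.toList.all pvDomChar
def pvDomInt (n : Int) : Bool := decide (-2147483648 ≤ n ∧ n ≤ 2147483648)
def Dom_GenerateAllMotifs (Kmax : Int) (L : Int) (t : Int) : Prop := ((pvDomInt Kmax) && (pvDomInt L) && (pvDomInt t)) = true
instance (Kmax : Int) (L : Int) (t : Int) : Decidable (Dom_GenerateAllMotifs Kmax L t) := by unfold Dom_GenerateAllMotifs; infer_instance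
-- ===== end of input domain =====

-- B generates patterns by explicit DFS recursion (no itertools.product) and builds every motif
-- independently back-to-front from its right endpoint, subtracting the pattern gaps, instead of
-- A's forward prefix-sum index vector repeatedly copied and incremented (objective: alternative).

-- ===== PORT A =====
-- itertools.product(xs, repeat=n) over a list of ints (rightmost position varies fastest)
def pyProduct (xs : List Int) : Nat → List (List Int)
  | 0 => [[]]
  | n + 1 => xs.flatMap (fun x => (pyProduct xs n).map (fun q => x :: q))

-- GenPatterns(L, x) = product(range(1, x+1), repeat=L)
def GenPatterns (L : Int) (x : Int) : List (List Int) :=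
  pyProduct (PySem.List.pyRange 1 (x + 1) 1) L.toNat

-- the while loop of GenerateMotifsByPattern; fuel only makes it total (Pre_ admits exactly the
-- inputs where the Python loop terminates, and there the fuel is the exact iteration count).
-- idx is nonempty throughout, so idx[len(idx)-1] is its last element (getLastD 0).
def motifsLoop (t : Int) : Nat → List Int → List (List Int)
  | 0, _ => []
  | fuel + 1, idx =>
      if idx.getLastD 0 = t + 1 then []
      else idx :: motifsLoop t fuel (idx.map (fun v => v + 1))

def GenerateMotifsByPattern (p : List Int) (t : Int) : List (List Int) :=
  let idx := p.foldl (fun idx x => idx ++ [idx.getLastD 0 + x]) [0]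
  motifsLoop t (t + 1 - idx.getLastD 0).toNat idx

def GenerateAllMotifs (Kmax : Int) (L : Int) (t : Int) : List (List Int × List (List Int)) :=
  (GenPatterns (L - 1) Kmax).foldl
    (fun acc p => acc ++ [(p, GenerateMotifsByPattern p t)]) []

-- ===== PORT B =====
-- m = [e]; for d in reversed(p): m.append(m[-1] - d); m.reverse()
def buildMotif (e : Int) (p : List Int) : List Int :=
  (p.reverse.foldl (fun m d => m ++ [m.getLastD 0 - d]) [e]).reverse

-- the 'while e != t + 1' loop of B; fuel only makes it total (exact iteration count under Pre_)
def motifsBLoop (p : List Int) (t : Int) : Nat → Int → List (List Int)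
  | 0, _ => []
  | fuel + 1, e => if e = t + 1 then [] else buildMotif e p :: motifsBLoop p t fuel (e + 1)

def motifsB (p : List Int) (t : Int) : List (List Int) :=
  motifsBLoop p t (t + 1 - p.sum).toNat p.sum

-- B's rec(p), with its 'len(p) == L - 1' test (target = L - 1); the fuel only makes the
-- recursion total (where the Python recursion terminates it is never exhausted)
def recPatterns (Kmax : Int) (t : Int) (target : Int) : Nat → List Int → List (List Int × List (List Int))
  | 0, p => if (p.length : Int) = target then [(p, motifsB p t)] else []
  | n + 1, p =>
      if (p.length : Int) = target then [(p, motifsB p t)]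
      else (PySem.List.pyRange 1 (Kmax + 1) 1).flatMap
             (fun v => recPatterns Kmax t target n (p ++ [v]))

def GenerateAllMotifs_alt (Kmax : Int) (L : Int) (t : Int) : List (List Int × List (List Int)) :=
  recPatterns Kmax t (L - 1) (L - 1).toNat []

-- ===== PRECONDITION & SPEC =====
-- Pre_ excludes exactly the inputs on which the Python A does not return: L ≤ 0 (ValueError from
-- product(…, repeat=L-1)) and the inputs on which some pattern's index sum overshoots t+1, where
-- A's 'while last != t+1' loop never terminates.
def Pre_GenerateAllMotifs (Kmax : Int) (L : Int) (t : Int) : Prop :=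
  1 ≤ L ∧ (L = 1 → 0 ≤ t + 1) ∧ (2 ≤ L → Kmax ≤ 0 ∨ (L - 1) * Kmax ≤ t + 1)
instance (Kmax : Int) (L : Int) (t : Int) : Decidable (Pre_GenerateAllMotifs Kmax L t) := by
  unfold Pre_GenerateAllMotifs; infer_instance

def pvWitness_GenerateAllMotifs : Int × Int × Int := (2, 3, 5)

def Spec_GenerateAllMotifs (Kmax : Int) (L : Int) (t : Int) (out : List (List Int × List (List Int))) : Prop := out = GenerateAllMotifs_alt Kmax L t
instance (Kmax : Int) (L : Int) (t : Int) (out : List (List Int × List (List Int))) : Decidable (Spec_GenerateAllMotifs Kmax L t out) := by unfold Spec_GenerateAllMotifs; infer_instance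

-- ===== CLAIM (what is proved, stated in full; the proofs are below) =====
def Claim_equal_GenerateAllMotifs : Prop := ∀ (Kmax : Int) (L : Int) (t : Int), Dom_GenerateAllMotifs Kmax L t → Pre_GenerateAllMotifs Kmax L t → Spec_GenerateAllMotifs Kmax L t (GenerateAllMotifs Kmax L t)

-- ===== LEMMAS AND PROOFS =====

-- running prefix sums starting at a: the canonical form both ports' motifs reduce to
def accum (a : Int) : List Int → List Int
  | [] => [a]
  | x :: xs => a :: accum (a + x) xs

-- running prefix DIFFERENCES starting at a: what B's inner for-loop builds (before reversing)
def decAccum (a : Int) : List Int → List Int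
  | [] => [a]
  | x :: xs => a :: decAccum (a - x) xs

theorem accum_ne_nil (a : Int) (p : List Int) : accum a p ≠ [] := by
  cases p <;> simp [accum]

theorem accum_getLastD (p : List Int) : ∀ (a d : Int), (accum a p).getLastD d = a + p.sum := by
  induction p with
  | nil => intro a d; simp [accum]
  | cons x xs ih =>
      intro a d
      simp only [accum, List.sum_cons, List.getLastD_cons, ih (a + x) a]
      ring

theorem accum_append_singleton (l : List Int) : ∀ (a x : Int),
    accum a (l ++ [x]) = accum a l ++ [a + l.sum + x] := by
  induction l with
  | nil => intro a x; simp [accum]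
  | cons y ys ih =>
      intro a x
      simp only [List.cons_append, accum, ih (a + y) x, List.sum_cons]
      refine congrArg (a :: ·) (congrArg _ ?_)
      refine congrArg (fun z => [z]) ?_
      ring

theorem accum_shift (p : List Int) : ∀ (b a : Int),
    accum (b + a) p = (accum b p).map (fun x => x + a) := by
  induction p with
  | nil => intro b a; simp [accum]
  | cons x xs ih =>
      intro b a
      simp only [accum, List.map_cons]
      refine congrArg₂ _ (by ring) ?_
      have : b + a + x = (b + x) + a := by ring
      rw [this, ih (b + x) a]

-- A-side lemmas -------------------------------------------------------------

theorem foldl_prefix (p : List Int) : ∀ (pre : List Int) (a : Int),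
    p.foldl (fun idx x => idx ++ [idx.getLastD 0 + x]) (pre ++ [a]) = pre ++ accum a p := by
  induction p with
  | nil => intro pre a; simp [accum]
  | cons x xs ih =>
      intro pre a
      simp only [List.foldl_cons, List.getLastD_concat]
      have : pre ++ [a] ++ [a + x] = (pre ++ [a]) ++ [a + x] := by simp
      rw [this, ih (pre ++ [a]) (a + x)]
      simp [accum]

theorem getLastD_map_succ (l : List Int) (h : l ≠ []) :
    ∀ (d e : Int), (l.map (fun v => v + 1)).getLastD d = l.getLastD e + 1 := by
  induction l with
  | nil => exact absurd rfl h
  | cons x xs ih =>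
      intro d e
      cases xs with
      | nil => simp
      | cons y tl =>
          rw [List.map_cons, List.getLastD_cons, List.getLastD_cons]
          exact ih (by simp) (x + 1) x

theorem motifsLoop_eq (t : Int) (fuel : Nat) (idx : List Int) (hne : idx ≠ [])
    (hlast : idx.getLastD 0 + fuel = t + 1) :
    motifsLoop t fuel idx = (List.range fuel).map (fun k : Nat => idx.map (fun x => x + (k : Int))) := by
  induction fuel generalizing idx with
  | zero => simp [motifsLoop]
  | succ n ih =>
      rw [motifsLoop]
      have hcond : idx.getLastD 0 ≠ t + 1 := by omega
      rw [if_neg hcond]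
      have hmapne : idx.map (fun v => v + 1) ≠ [] := by simpa using hne
      have hmaplast : (idx.map (fun v => v + 1)).getLastD 0 = idx.getLastD 0 + 1 :=
        getLastD_map_succ idx hne 0 0
      rw [ih (idx.map (fun v => v + 1)) hmapne (by rw [hmaplast]; push_cast at hlast ⊢; omega)]
      have hr : List.range (n + 1) = 0 :: (List.range n).map (fun k => k + 1) := by
        rw [List.range_succ_eq_map]
      rw [hr, List.map_cons]
      refine List.cons_eq_cons.mpr ⟨by simp, ?_⟩
      rw [List.map_map]
      apply List.map_congr_left
      intro k _
      simp only [Function.comp_apply, List.map_map]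
      apply List.map_congr_left
      intro x _
      simp only [Function.comp_apply]
      push_cast
      ring

theorem mem_pyProduct {xs : List Int} {n : Nat} {q : List Int} (h : q ∈ pyProduct xs n) :
    q.length = n ∧ ∀ x ∈ q, x ∈ xs := by
  induction n generalizing q with
  | zero => simp [pyProduct] at h; simp [h]
  | succ m ih =>
      simp only [pyProduct, List.mem_flatMap, List.mem_map] at h
      obtain ⟨x, hx, q', hq', rfl⟩ := h
      obtain ⟨hlen, hall⟩ := ih hq'
      refine ⟨by simp [hlen], ?_⟩
      intro y hy
      rcases List.mem_cons.mp hy with rfl | hy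
      · exact hx
      · exact hall y hy

theorem sum_le_of_forall_le (K : Int) (q : List Int) (h : ∀ x ∈ q, x ≤ K) :
    q.sum ≤ (q.length : Int) * K := by
  induction q with
  | nil => simp
  | cons x xs ih =>
      simp only [List.sum_cons, List.length_cons]
      have hx := h x (by simp)
      have hxs := ih (fun y hy => h y (List.mem_cons_of_mem _ hy))
      push_cast
      nlinarith [hx, hxs]

-- under Pre_, every generated pattern's sum stays ≤ t + 1, so both while loops terminate
theorem pattern_sum_le (Kmax L t : Int) (hpre : Pre_GenerateAllMotifs Kmax L t)
    (q : List Int) (hq : q ∈ pyProduct (PySem.List.pyRange 1 (Kmax + 1) 1) (L - 1).toNat) :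
    q.sum ≤ t + 1 := by
  obtain ⟨hL, h1, h2⟩ := hpre
  obtain ⟨hlen, hall⟩ := mem_pyProduct hq
  have hmem : ∀ x ∈ q, 1 ≤ x ∧ x ≤ Kmax := by
    intro x hx
    have := (PySem.List.mem_pyRange_one).mp (hall x hx)
    omega
  rcases eq_or_lt_of_le hL with hL1 | hL2
  · -- L = 1 : the only pattern is []
    have : (L - 1).toNat = 0 := by omega
    rw [this] at hlen
    have : q = [] := List.eq_nil_of_length_eq_zero hlen
    subst this
    simp
    omega
  · -- 2 ≤ L
    have h2L : 2 ≤ L := by omega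
    cases q with
    | nil =>
        simp at hlen
        omega
    | cons x xs =>
        have hK1 : 1 ≤ Kmax := by
          have := hmem x (by simp)
          omega
        have hKle : (L - 1) * Kmax ≤ t + 1 := by
          rcases h2 h2L with hk | hk
          · omega
          · exact hk
        have hsum : (x :: xs).sum ≤ ((x :: xs).length : Int) * Kmax :=
          sum_le_of_forall_le Kmax _ (fun y hy => (hmem y hy).2)
        have hcast : (((x :: xs).length : Int)) = L - 1 := by
          rw [hlen]; omega
        rw [hcast] at hsum
        omega

-- A per pattern reduces to the canonical shifted-prefix-sum form
theorem per_pattern (Kmax L t : Int) (hpre : Pre_GenerateAllMotifs Kmax L t)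
    (q : List Int) (hq : q ∈ pyProduct (PySem.List.pyRange 1 (Kmax + 1) 1) (L - 1).toNat) :
    GenerateMotifsByPattern q t
      = (List.range (t + 1 - q.sum).toNat).map
          (fun k : Nat => (accum 0 q).map (fun x => x + (k : Int))) := by
  unfold GenerateMotifsByPattern
  have hfold : q.foldl (fun idx x => idx ++ [idx.getLastD 0 + x]) [0] = accum 0 q := by
    have := foldl_prefix q [] 0
    simpa using this
  simp only [hfold]
  have hs : (accum 0 q).getLastD 0 = q.sum := by
    rw [accum_getLastD]; ring
  rw [hs]
  apply motifsLoop_eq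
  · exact accum_ne_nil 0 q
  · rw [hs]
    have := pattern_sum_le Kmax L t hpre q hq
    omega

-- B-side lemmas -------------------------------------------------------------

theorem foldl_dec_prefix (q : List Int) : ∀ (pre : List Int) (a : Int),
    q.foldl (fun m d => m ++ [m.getLastD 0 - d]) (pre ++ [a]) = pre ++ decAccum a q := by
  induction q with
  | nil => intro pre a; simp [decAccum]
  | cons x xs ih =>
      intro pre a
      simp only [List.foldl_cons, List.getLastD_concat]
      have : pre ++ [a] ++ [a - x] = (pre ++ [a]) ++ [a - x] := by simp
      rw [this, ih (pre ++ [a]) (a - x)]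
      simp [decAccum]

theorem decAccum_reverse (q : List Int) : ∀ (e : Int),
    (decAccum e q).reverse = accum (e - q.sum) q.reverse := by
  induction q with
  | nil => intro e; simp [decAccum, accum]
  | cons x xs ih =>
      intro e
      simp only [decAccum, List.reverse_cons, ih (e - x), List.sum_cons]
      rw [accum_append_singleton]
      have h1 : e - (x + xs.sum) = e - x - xs.sum := by ring
      rw [h1]
      have h2 : e - x - xs.sum + xs.reverse.sum + x = e := by
        rw [List.sum_reverse]; ring
      rw [h2]

theorem buildMotif_eq (e : Int) (p : List Int) :
    buildMotif e p = accum (e - p.sum) p := by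
  unfold buildMotif
  have hf := foldl_dec_prefix p.reverse [] e
  simp only [List.nil_append] at hf
  rw [hf, decAccum_reverse, List.sum_reverse, List.reverse_reverse]

theorem motifsBLoop_eq (p : List Int) (t : Int) (fuel : Nat) : ∀ (e : Int),
    e + fuel = t + 1 →
    motifsBLoop p t fuel e
      = (List.range fuel).map (fun k : Nat => buildMotif (e + (k : Int)) p) := by
  induction fuel with
  | zero => intro e _; simp [motifsBLoop]
  | succ n ih =>
      intro e he
      rw [motifsBLoop]
      have hcond : e ≠ t + 1 := by omega
      rw [if_neg hcond, ih (e + 1) (by push_cast at he ⊢; omega)]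
      have hr : List.range (n + 1) = 0 :: (List.range n).map (fun k => k + 1) := by
        rw [List.range_succ_eq_map]
      rw [hr, List.map_cons]
      refine List.cons_eq_cons.mpr ⟨by norm_num, ?_⟩
      rw [List.map_map]
      apply List.map_congr_left
      intro k _
      simp only [Function.comp_apply]
      congr 1
      push_cast
      ring

-- B per pattern reduces to the same canonical form
theorem per_pattern_B (t : Int) (q : List Int) (hle : q.sum ≤ t + 1) :
    motifsB q t
      = (List.range (t + 1 - q.sum).toNat).map
          (fun k : Nat => (accum 0 q).map (fun x => x + (k : Int))) := by
  unfold motifsB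
  rw [motifsBLoop_eq q t (t + 1 - q.sum).toNat q.sum (by omega)]
  apply List.map_congr_left
  intro k _
  rw [buildMotif_eq]
  have : q.sum + (k : Int) - q.sum = 0 + (k : Int) := by ring
  rw [this, accum_shift]

-- the DFS recursion enumerates exactly pyProduct, in the same order
theorem recPatterns_eq (Kmax t target : Int) (n : Nat) : ∀ (pre : List Int),
    (pre.length : Int) + n = target →
    recPatterns Kmax t target n pre
      = (pyProduct (PySem.List.pyRange 1 (Kmax + 1) 1) n).map
          (fun q => (pre ++ q, motifsB (pre ++ q) t)) := by
  induction n with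
  | zero =>
      intro pre h
      simp only [Nat.cast_zero, add_zero] at h
      simp [recPatterns, pyProduct, h]
  | succ m ih =>
      intro pre h
      have hne : (pre.length : Int) ≠ target := by push_cast at h; omega
      simp only [recPatterns, if_neg hne, pyProduct, List.map_flatMap]
      apply List.flatMap_congr
      intro v _
      rw [ih (pre ++ [v]) (by simp only [List.length_append, List.length_cons, List.length_nil]; push_cast at h ⊢; omega), List.map_map]
      apply List.map_congr_left
      intro q _
      simp

-- ===== VERDICT (by name: the statement is the Claim_ definition above) =====
theorem GenerateAllMotifs_spec : Claim_equal_GenerateAllMotifs := by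
  intro Kmax L t _ hpre
  unfold Spec_GenerateAllMotifs GenerateAllMotifs GenerateAllMotifs_alt GenPatterns
  rw [PySem.List.foldl_append_singleton_eq_map,
      recPatterns_eq Kmax t (L - 1) (L - 1).toNat [] (by have := hpre.1; simp; omega)]
  simp only [List.nil_append]
  apply List.map_congr_left
  intro q hq
  rw [per_pattern Kmax L t hpre q hq, per_pattern_B t q (pattern_sum_le Kmax L t hpre q hq)]
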